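-- pv_equiv track=rewrite | github.com/CleitonSilvaPaes/geek_university_exercicio | Curso01/Secao08/22.py | pilha
-- ===== SOURCE A (Python) =====
-- def pilha(*args):
--     n = args[0]
--     pilhas = str()
--     for i in range(n):
--         for j in range(i+1):
--             pilhas += pilhas.join('!')
--         pilhas += pilhas.join('\n')
--     return pilhas
-- ===== SOURCE B (Python) =====
-- def pilha(*args):
--     n = args[0]
--     return ''.join('!' * (i + 1) + '\n' for i in range(n))
-- ===== Notes on version B (the rewrite author's own statement) =====
-- stated objective: simpler
-- what changed: B replaces A's nested character-appending loops (whose inner 'pilhas.join' is always just '!') with a single join of closed-form rows '!'*(i+1)+'\n'.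
import Mathlib
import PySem

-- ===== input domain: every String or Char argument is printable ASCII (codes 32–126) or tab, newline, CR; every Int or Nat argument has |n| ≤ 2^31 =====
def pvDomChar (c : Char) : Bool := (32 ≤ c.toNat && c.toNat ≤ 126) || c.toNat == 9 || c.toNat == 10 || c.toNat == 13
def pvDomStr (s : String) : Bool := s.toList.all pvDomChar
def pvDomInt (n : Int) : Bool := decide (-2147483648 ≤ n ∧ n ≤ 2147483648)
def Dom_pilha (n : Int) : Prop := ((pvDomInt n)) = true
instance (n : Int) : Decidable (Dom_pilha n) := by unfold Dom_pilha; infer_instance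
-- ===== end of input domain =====

-- B replaces A's nested character-appending loops (whose inner join always yields '!') with a
-- single join of the closed-form rows '!'*(i+1)+'\n'; objective: simpler.

-- ===== PORT A =====
def pilha (n : Int) : String :=
  (PySem.List.pyRange 0 n 1).foldl
    (fun pilhas i =>
      let pilhas :=
        (PySem.List.pyRange 0 (i + 1) 1).foldl
          (fun pilhas _j => pilhas ++ PySem.Str.join pilhas ["!"]) pilhas
      pilhas ++ PySem.Str.join pilhas ["\n"])
    ""

-- ===== PORT B =====
def pilha_alt (n : Int) : String :=
  PySem.Str.join ""
    ((PySem.List.pyRange 0 n 1).map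
      (fun i => String.ofList (PySem.List.pyRepeat ['!'] (i + 1)) ++ "\n"))

-- ===== PRECONDITION & SPEC =====
def Spec_pilha (n : Int) (out : String) : Prop := out = pilha_alt n
instance (n : Int) (out : String) : Decidable (Spec_pilha n out) := by unfold Spec_pilha; infer_instance

-- ===== CLAIM (what is proved, stated in full; the proofs are below) =====
def Claim_equal_pilha : Prop := ∀ (n : Int), Dom_pilha n → Spec_pilha n (pilha n)

-- ===== LEMMAS AND PROOFS =====

-- s.join('!') = '!' whatever s is: joining a one-element sequence uses no separator
theorem join_one (s x : String) : PySem.Str.join s [x] = x := by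
  apply String.toList_inj.mp
  simp [PySem.Chars.join_singleton]

-- ''.join(parts) is plain concatenation
theorem join_empty_sep (xss : List (List Char)) : List.intercalate [] xss = xss.flatten := by
  induction xss with
  | nil => simp [List.intercalate]
  | cons x xs ih =>
    cases xs with
    | nil => simp [List.intercalate]
    | cons y ys =>
      simp only [List.intercalate, List.intersperse, List.flatten] at *
      simp [ih]

-- the characters of A's row for index i: '!'*(i+1) then the newline
def rowL (i : Int) : List Char := List.replicate (i + 1).toNat '!' ++ ['\n']

-- appending one '!' per iteration appends l.length copies of '!'
theorem inner_bang (l : List Int) (s : String) :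
    l.foldl (fun p (_ : Int) => p ++ "!") s
      = s ++ String.ofList (List.replicate l.length '!') := by
  induction l generalizing s with
  | nil => simp
  | cons x xs ih =>
    apply String.toList_inj.mp
    simp [ih]
    rw [← List.replicate_succ, List.replicate_succ']

-- A's loop body, as one append of the row for i
theorem step_eq :
    (fun (pilhas : String) (i : Int) =>
      let pilhas :=
        (PySem.List.pyRange 0 (i + 1) 1).foldl
          (fun pilhas _j => pilhas ++ PySem.Str.join pilhas ["!"]) pilhas
      pilhas ++ PySem.Str.join pilhas ["\n"])
    = fun (s : String) (i : Int) => s ++ String.ofList (rowL i) := by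
  funext s i
  simp only [join_one, inner_bang, PySem.List.length_pyRange_one, Int.sub_zero, rowL]
  apply String.toList_inj.mp
  simp

-- folding row appends concatenates the rows
theorem fold_rows (l : List Int) (s : String) :
    (l.foldl (fun (s : String) (i : Int) => s ++ String.ofList (rowL i)) s).toList
      = s.toList ++ (l.map rowL).flatten := by
  induction l generalizing s with
  | nil => simp
  | cons x xs ih => simp [ih]

-- ===== VERDICT (by name: the statement is the Claim_ definition above) =====
theorem pilha_spec : Claim_equal_pilha := by
  intro n _
  unfold Spec_pilha pilha pilha_alt
  apply String.toList_inj.mp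
  rw [step_eq, fold_rows]
  simp [PySem.Str.join, PySem.Chars.join, join_empty_sep, Function.comp_def,
    PySem.List.pyRepeat_singleton]
  rfl
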